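-- pv_equiv track=rewrite | github.com/blackburi/python_algorithm_TIL | programmers/previous_examination/kakao/2023_kakao_blind_recruitment_150367.py | solution
-- ===== SOURCE A (Python) =====
-- def check(b, left, right) :
--     # 리프 노드까지 도달 -> 포화 이진트리로 표현 가능
--     if left == right :
--         return True
--
--     # left, right가 있는 트리의 root node index 계산
--     mid = (left + right) // 2
--     root = b[mid]
--
--     # 왼쪽 자식 index
--     left_child = b[(left + (mid-1))//2]
--     # 오른쪽 자식 index
--     right_child = b[(right + (mid+1))//2]
--
--     # 부모가 0인데 자식이 1인경우 False 반환(왼)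
--     if left_child == '1' and root == '0' :
--         return False
--
--     # 부모가 0인데 자식이 1인경우 False 반환(오)
--     if right_child == '1' and root == '0' :
--         return False
--
--     # 왼쪽 자식 트리, 오른쪽 자식 트리 확인
--     return check(b, left, mid-1) and check(b, mid+1, right)
--
-- def solution(numbers):
--     answer = []
--
--     for num in numbers :
--         # 1은 항상 가능
--         if num == 1 :
--             answer.append(1)
--             continue
--
--         # 2진수로 변환
--         # 0b10101... 형태로 나오기 때문에 index == 2 부터 필요
--         bin_num = bin(num)[2:]
--
--         # 이진트리를 만들어본다
--         # 이진트리는 1-> 3-> 7 -> 15 ...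
--         # 2**n -1 형태의 수들을 띈다.
--
--         # 트리의 크기 (전체 노드의 수)
--         size = 1
--         while size < len(bin_num) :
--             size = size * 2 + 1
--
--         # 크기에 맞춰서 이진수의 자릿수를 맞춰준다.
--         # 111 -> 111, 1111 -> 0001111
--         bin_num = '0'*(size - len(bin_num)) + bin_num
--
--         # 포화 이진트리 확인
--         if check(bin_num, 0, len(bin_num)-1) :
--             answer.append(1)
--         else :
--             answer.append(0)
--     return answer
-- ===== SOURCE B (Python) =====
-- # B: same outer loop and size/padding as the task demands, but the recursive
-- # midpoint check is replaced by a flat scan testing each parent->child edge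
-- # via lowest-set-bit arithmetic on the node's 1-based index.
--
-- def lowbit(j):
--     s = 1
--     while j % 2 == 0:
--         j //= 2
--         s *= 2
--     return s
--
--
-- def good(b, i):
--     j = i + 1
--     s = lowbit(j)
--     if s == 1 or b[i] != '0':
--         return True
--     h = s // 2
--     return b[i - h] != '1' and b[i + h] != '1'
--
--
-- def solution(numbers):
--     answer = []
--     for num in numbers:
--         if num == 1:
--             answer.append(1)
--             continue
--         bin_num = bin(num)[2:]
--         size = 1
--         while size < len(bin_num):
--             size = size * 2 + 1
--         bin_num = '0' * (size - len(bin_num)) + bin_num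
--         answer.append(1 if all(good(bin_num, i) for i in range(size)) else 0)
--     return answer
-- ===== Notes on version B (the rewrite author's own statement) =====
-- stated objective: alternative
-- what changed: The recursive midpoint-descent check over each perfect binary tree is replaced by a single flat scan of the padded binary string that tests every parent-to-child edge directly via lowest-set-bit index arithmetic (parent/child offsets computed from the 1-based node index), with no recursion.
import Mathlib
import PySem

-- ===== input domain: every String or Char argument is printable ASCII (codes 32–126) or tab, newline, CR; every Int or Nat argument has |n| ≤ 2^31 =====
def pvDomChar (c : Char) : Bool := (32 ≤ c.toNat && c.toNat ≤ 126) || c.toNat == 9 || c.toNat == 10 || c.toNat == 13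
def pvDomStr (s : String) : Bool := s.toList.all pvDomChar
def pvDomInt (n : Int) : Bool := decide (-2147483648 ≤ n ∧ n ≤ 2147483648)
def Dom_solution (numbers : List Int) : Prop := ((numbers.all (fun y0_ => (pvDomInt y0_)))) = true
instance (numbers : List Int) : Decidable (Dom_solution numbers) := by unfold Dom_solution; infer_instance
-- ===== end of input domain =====

-- B replaces A's recursive midpoint descent over the perfect tree by a single flat
-- scan that tests each parent->child edge via lowest-set-bit index arithmetic
-- (objective: alternative; same asymptotic cost, no recursion).

-- ===== PORT A =====
-- the 'size = size*2+1 while size < len' loop of solution (identical line in both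
-- Python sources, so both ports call it); fuel = len.toNat is always sufficient
def sizeLoop : Nat → Int → Int → Int
  | 0, size, _ => size
  | f+1, size, len => if size < len then sizeLoop f (size * 2 + 1) len else size

-- check(b, left, right); the recursion is made total with a fuel argument, which is
-- always sufficient on the calls solution makes (fuel ≥ recursion depth there), and
-- pyGetD's default ' ' is never read there (indices stay in range).
def checkFuel : Nat → List Char → Int → Int → Bool
  | 0, _, _, _ => true
  | f+1, b, left, right =>
    if left == right then true
    else
      let mid := PySem.Int.floordiv (left + right) 2
      let root := PySem.List.pyGetD b mid ' '
      let left_child := PySem.List.pyGetD b (PySem.Int.floordiv (left + (mid - 1)) 2) ' '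
      let right_child := PySem.List.pyGetD b (PySem.Int.floordiv (right + (mid + 1)) 2) ' '
      if left_child == '1' && root == '0' then false
      else if right_child == '1' && root == '0' then false
      else checkFuel f b left (mid - 1) && checkFuel f b (mid + 1) right

def check (b : List Char) (left right : Int) : Bool :=
  checkFuel ((right - left).toNat + 1) b left right

def solution (numbers : List Int) : List Int :=
  numbers.foldl (fun answer num =>
    if num == 1 then answer ++ [1]
    else
      -- bin(num)[2:]
      let bin0 := PySem.List.slice (PySem.Int.toBinChars0b num) (some 2) none
      let size := sizeLoop (PySem.List.len bin0).toNat 1 (PySem.List.len bin0)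
      -- '0'*(size - len(bin_num)) + bin_num
      let bin_num := PySem.List.pyRepeat ['0'] (size - PySem.List.len bin0) ++ bin0
      if check bin_num 0 (PySem.List.len bin_num - 1) then answer ++ [1] else answer ++ [0]) []

-- ===== PORT B =====
-- Source B's lowbit while-loop as recursion on the halved argument; exact for j ≥ 1
-- (the only calls Source B makes; Python's loop does not terminate at j = 0)
def lowbitNat : Nat → Int
  | 0 => 1
  | j+1 => if (j+1) % 2 == 0 then 2 * lowbitNat ((j+1) / 2) else 1

def lowbit (j : Int) : Int := lowbitNat j.toNat

-- good(b, i): node i is fine unless it is '0' with a '1' child; pyGetD's default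
-- is never read on the calls solution_alt makes (indices stay in range)
def good (b : List Char) (i : Int) : Bool :=
  let j := i + 1
  let s := lowbit j
  if s == 1 || PySem.List.pyGetD b i ' ' != '0' then true
  else
    let h := PySem.Int.floordiv s 2
    (PySem.List.pyGetD b (i - h) ' ' != '1') && (PySem.List.pyGetD b (i + h) ' ' != '1')

def solution_alt (numbers : List Int) : List Int :=
  numbers.foldl (fun answer num =>
    if num == 1 then answer ++ [1]
    else
      let bin0 := PySem.List.slice (PySem.Int.toBinChars0b num) (some 2) none
      let size := sizeLoop (PySem.List.len bin0).toNat 1 (PySem.List.len bin0)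
      let bin_num := PySem.List.pyRepeat ['0'] (size - PySem.List.len bin0) ++ bin0
      answer ++ [if (PySem.List.pyRange 0 size 1).all (good bin_num) then 1 else 0]) []

-- ===== PRECONDITION & SPEC =====
def Spec_solution (numbers : List Int) (out : List Int) : Prop := out = solution_alt numbers
instance (numbers : List Int) (out : List Int) : Decidable (Spec_solution numbers out) := by unfold Spec_solution; infer_instance

-- ===== CLAIM (what is proved, stated in full; the proofs are below) =====
def Claim_equal_solution : Prop := ∀ (numbers : List Int), Dom_solution numbers → Spec_solution numbers (solution numbers)

-- ===== LEMMAS AND PROOFS =====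

lemma lowbitNat_odd (j : Nat) (h : j % 2 = 1) : lowbitNat j = 1 := by
  cases j with
  | zero => simp at h
  | succ m => rw [lowbitNat]; simp [h]

lemma lowbitNat_double (j : Nat) (h : 1 ≤ j) : lowbitNat (2 * j) = 2 * lowbitNat j := by
  have h2 : 2 * j = (2 * j - 1) + 1 := by omega
  rw [h2, lowbitNat]
  have : ((2 * j - 1) + 1) % 2 = 0 := by omega
  simp [this]
  congr 1
  omega

lemma lowbitNat_pow_mul (n q : Nat) (h : q % 2 = 1) : lowbitNat (2 ^ n * q) = (2 : Int) ^ n := by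
  induction n with
  | zero => simpa using lowbitNat_odd q h
  | succ m ih =>
      have : 2 ^ (m + 1) * q = 2 * (2 ^ m * q) := by ring
      rw [this, lowbitNat_double _ (Nat.mul_pos (Nat.two_pow_pos m) (by omega))]
      rw [ih]; ring

lemma sizeLoop_spec : ∀ (f j : Nat) (len : Int), 1 ≤ j → len ≤ 2 ^ j - 1 + f →
    ∃ k : Nat, j ≤ k ∧ sizeLoop f ((2 : Int) ^ j - 1) len = 2 ^ k - 1 ∧ len ≤ 2 ^ k - 1 := by
  intro f
  induction f with
  | zero =>
      intro j len hj hlen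
      exact ⟨j, le_refl j, rfl, by simpa using hlen⟩
  | succ f ih =>
      intro j len hj hlen
      rw [sizeLoop]
      by_cases hlt : (2 : Int) ^ j - 1 < len
      · simp only [hlt, if_true]
        have hstep : ((2 : Int) ^ j - 1) * 2 + 1 = 2 ^ (j + 1) - 1 := by ring
        rw [hstep]
        have h1 : (1 : Int) ≤ 2 ^ j := by
          have := pow_pos (by norm_num : (0:Int) < 2) j; omega
        have hlen' : len ≤ 2 ^ (j + 1) - 1 + f := by
          have : (2 : Int) ^ (j + 1) = 2 * 2 ^ j := by ring
          omega
        obtain ⟨k, hk1, hk2, hk3⟩ := ih (j + 1) len (by omega) hlen'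
        exact ⟨k, by omega, hk2, hk3⟩
      · simp only [hlt, if_false]
        exact ⟨j, le_refl j, rfl, by omega⟩

-- the heart: on an aligned perfect subtree, A's recursive check equals B's flat
-- edge scan over the subtree's index range
lemma checkFuel_eq_all (b : List Char) :
    ∀ (m f : Nat) (l : Int), m + 1 ≤ f → 0 ≤ l → ((2 : Int) ^ (m + 1)) ∣ l →
      checkFuel f b l (l + 2 ^ (m + 1) - 2) =
        (PySem.List.pyRange l (l + 2 ^ (m + 1) - 1) 1).all (good b) := by
  intro m
  induction m with
  | zero =>
      intro f l hf hl hdvd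
      obtain ⟨g, rfl⟩ : ∃ g, f = g + 1 := ⟨f - 1, by omega⟩
      have hr : l + 2 ^ (0 + 1) - 2 = l := by norm_num
      have hrange : l + 2 ^ (0 + 1) - 1 = l + 1 := by
        have h2 : (2 : Int) ^ (0 + 1) = 2 := by norm_num
        omega
      rw [hr, hrange, PySem.List.pyRange_one_singleton]
      have hgood : good b l = true := by
        simp only [good, lowbit]
        have hodd : (l + 1).toNat % 2 = 1 := by
          obtain ⟨t, ht⟩ := hdvd
          omega
        rw [lowbitNat_odd _ hodd]
        simp
      simp [checkFuel, hgood]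
  | succ m ih =>
      intro f l hf hl hdvd
      obtain ⟨g, rfl⟩ : ∃ g, f = g + 1 := ⟨f - 1, by omega⟩
      -- abbreviations for the powers involved
      have hQ1 : (2 : Int) ^ 1 ≤ 2 ^ (m + 1) := by
        apply pow_le_pow_right₀ <;> omega
      have hQ : (2 : Int) ≤ 2 ^ (m + 1) := by simpa using hQ1
      have hP2 : (2 : Int) ^ (m + 2) = 2 * 2 ^ (m + 1) := by ring
      have hP1 : (2 : Int) ^ (m + 1) = 2 * 2 ^ m := by ring
      have hQ0 : (1 : Int) ≤ 2 ^ m := by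
        have := pow_pos (by norm_num : (0:Int) < 2) m; omega
      set P : Int := 2 ^ m with hPdef
      have hne : (l == l + 2 ^ (m + 2) - 2) = false := by
        simp only [beq_eq_false_iff_ne, ne_eq]
        omega
      rw [checkFuel]
      simp only [hne, Bool.false_eq_true, if_false]
      have hmid : PySem.Int.floordiv (l + (l + 2 ^ (m + 2) - 2)) 2 = l + 2 ^ (m + 1) - 1 := by
        rw [PySem.Int.floordiv_eq_ediv_of_pos (by norm_num)]
        have harg : l + (l + 2 ^ (m + 2) - 2) = 2 * (l + 2 ^ (m + 1) - 1) := by ring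
        rw [harg, Int.mul_ediv_cancel_left _ (by norm_num)]
      rw [hmid]
      set mid : Int := l + 2 ^ (m + 1) - 1 with hmiddef
      have hlc : PySem.Int.floordiv (l + (mid - 1)) 2 = mid - 2 ^ m := by
        rw [PySem.Int.floordiv_eq_ediv_of_pos (by norm_num)]
        have harg : l + (mid - 1) = 2 * (mid - 2 ^ m) := by rw [hmiddef]; ring
        rw [harg, Int.mul_ediv_cancel_left _ (by norm_num)]
      have hrc : PySem.Int.floordiv (l + 2 ^ (m + 2) - 2 + (mid + 1)) 2 = mid + 2 ^ m := by
        rw [PySem.Int.floordiv_eq_ediv_of_pos (by norm_num)]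
        have harg : l + 2 ^ (m + 2) - 2 + (mid + 1) = 2 * (mid + 2 ^ m) := by rw [hmiddef]; ring
        rw [harg, Int.mul_ediv_cancel_left _ (by norm_num)]
      rw [hlc, hrc]
      -- the two recursive calls, by the induction hypothesis
      have hdvd' : ((2 : Int) ^ (m + 1)) ∣ l := dvd_trans ⟨2, by ring⟩ hdvd
      have hL : checkFuel g b l (mid - 1) =
          (PySem.List.pyRange l mid 1).all (good b) := by
        have h1 : mid - 1 = l + 2 ^ (m + 1) - 2 := by rw [hmiddef]; ring
        have h2 : mid = l + 2 ^ (m + 1) - 1 := hmiddef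
        rw [h1, h2]
        exact ih g l (by omega) hl hdvd'
      have hdvdR : ((2 : Int) ^ (m + 1)) ∣ (mid + 1) := by
        have : mid + 1 = l + 2 ^ (m + 1) := by rw [hmiddef]; ring
        rw [this]
        exact dvd_add hdvd' dvd_rfl
      have hR : checkFuel g b (mid + 1) (l + 2 ^ (m + 2) - 2) =
          (PySem.List.pyRange (mid + 1) (l + 2 ^ (m + 2) - 1) 1).all (good b) := by
        have h1 : l + 2 ^ (m + 2) - 2 = (mid + 1) + 2 ^ (m + 1) - 2 := by rw [hmiddef]; ring
        have h2 : l + 2 ^ (m + 2) - 1 = (mid + 1) + 2 ^ (m + 1) - 1 := by rw [hmiddef]; ring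
        rw [h1, h2]
        exact ih g (mid + 1) (by omega) (by omega) hdvdR
      -- good at the subtree's root
      have hgoodmid : good b mid =
          (!(PySem.List.pyGetD b mid ' ' == '0') ||
            (PySem.List.pyGetD b (mid - 2 ^ m) ' ' != '1' &&
             PySem.List.pyGetD b (mid + 2 ^ m) ' ' != '1')) := by
        simp only [good, lowbit]
        obtain ⟨t, ht⟩ := hdvd
        have ht0 : 0 ≤ t := by nlinarith
        have htn : (mid + 1).toNat = 2 ^ (m + 1) * (2 * t.toNat + 1) := by
          have h1 : mid + 1 = l + 2 ^ (m + 1) := by rw [hmiddef]; ring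
          have h2 : ((2 : Int) ^ (m + 1)) = ((2 ^ (m + 1) : Nat) : Int) := by push_cast; ring
          have h3 : mid + 1 = ((2 ^ (m + 1) * (2 * t.toNat + 1) : Nat) : Int) := by
            push_cast
            rw [h1, ht]
            have : t = (t.toNat : Int) := by omega
            rw [hP2]
            nlinarith [this]
          omega
        rw [htn, lowbitNat_pow_mul _ _ (by omega)]
        have hs1 : ((2 : Int) ^ (m + 1) == 1) = false := by
          simp only [beq_eq_false_iff_ne, ne_eq]
          omega
        have hh : PySem.Int.floordiv ((2 : Int) ^ (m + 1)) 2 = 2 ^ m := by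
          rw [PySem.Int.floordiv_eq_ediv_of_pos (by norm_num), hP1,
            Int.mul_ediv_cancel_left _ (by norm_num)]
        rw [hs1, hh]
        by_cases hroot : PySem.List.pyGetD b mid ' ' = '0' <;> simp [hroot]
      -- split B's range at the root
      have hcons : PySem.List.pyRange mid (l + 2 ^ (m + 2) - 1) 1 =
          mid :: PySem.List.pyRange (mid + 1) (l + 2 ^ (m + 2) - 1) 1 :=
        PySem.List.pyRange_one_cons (by omega)
      rw [PySem.List.pyRange_one_append l mid (l + 2 ^ (m + 2) - 1) (by omega) (by omega),
        hcons, hL, hR]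
      simp only [List.all_append, List.all_cons, hgoodmid]
      -- pure boolean bookkeeping
      by_cases h0 : PySem.List.pyGetD b mid ' ' = '0' <;>
        by_cases h1 : PySem.List.pyGetD b (mid - 2 ^ m) ' ' = '1' <;>
        by_cases h2 : PySem.List.pyGetD b (mid + 2 ^ m) ' ' = '1' <;>
          cases hA : (PySem.List.pyRange l mid 1).all (good b) <;>
          cases hB : (PySem.List.pyRange (mid + 1) (l + 2 ^ (m + 2) - 1) 1).all (good b) <;>
            simp [h0, h1, h2]

-- one step of the two folds agrees
lemma step_eq (answer : List Int) (num : Int) :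
    (if num == 1 then answer ++ [1]
     else
      let bin0 := PySem.List.slice (PySem.Int.toBinChars0b num) (some 2) none
      let size := sizeLoop (PySem.List.len bin0).toNat 1 (PySem.List.len bin0)
      let bin_num := PySem.List.pyRepeat ['0'] (size - PySem.List.len bin0) ++ bin0
      if check bin_num 0 (PySem.List.len bin_num - 1) then answer ++ [1] else answer ++ [0]) =
    (if num == 1 then answer ++ [1]
     else
      let bin0 := PySem.List.slice (PySem.Int.toBinChars0b num) (some 2) none
      let size := sizeLoop (PySem.List.len bin0).toNat 1 (PySem.List.len bin0)
      let bin_num := PySem.List.pyRepeat ['0'] (size - PySem.List.len bin0) ++ bin0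
      answer ++ [if (PySem.List.pyRange 0 size 1).all (good bin_num) then 1 else 0]) := by
  by_cases h1 : num == 1
  · simp [h1]
  · simp only [h1, Bool.false_eq_true, if_false]
    set bin0 := PySem.List.slice (PySem.Int.toBinChars0b num) (some 2) none with hbin0
    have hlen0 : (0 : Int) ≤ PySem.List.len bin0 := by
      rw [PySem.List.len_eq]; exact Int.natCast_nonneg _
    obtain ⟨k, hk1, hk2, hk3⟩ := sizeLoop_spec (PySem.List.len bin0).toNat 1 (PySem.List.len bin0)
      (le_refl 1) (by rw [show (2 : Int) ^ 1 - 1 = 1 from by norm_num]; omega)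
    rw [show (2 : Int) ^ 1 - 1 = 1 from by norm_num] at hk2
    set size := sizeLoop (PySem.List.len bin0).toNat 1 (PySem.List.len bin0) with hsizedef
    set bin_num := PySem.List.pyRepeat ['0'] (size - PySem.List.len bin0) ++ bin0 with hbn
    have h2k : (1 : Int) ≤ 2 ^ k := by
      have := pow_pos (by norm_num : (0:Int) < 2) k; omega
    have hlenbn : PySem.List.len bin_num = size := by
      rw [hbn, PySem.List.len_eq, List.length_append, PySem.List.pyRepeat_singleton,
        List.length_replicate]
      rw [PySem.List.len_eq] at hk3 hlen0 ⊢
      omega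
    obtain ⟨p, rfl⟩ : ∃ p, k = p + 1 := ⟨k - 1, by omega⟩
    have hkey : check bin_num 0 (PySem.List.len bin_num - 1) =
        (PySem.List.pyRange 0 size 1).all (good bin_num) := by
      unfold check
      have hr' : PySem.List.len bin_num - 1 = (0 : Int) + 2 ^ (p + 1) - 2 := by
        rw [hlenbn, hk2]; ring
      have hrange : size = (0 : Int) + 2 ^ (p + 1) - 1 := by rw [hk2]; ring
      rw [hr', hrange]
      refine checkFuel_eq_all bin_num p _ 0 ?_ (le_refl 0) (Dvd.intro 0 (by ring))
      have hplt : (p + 1 : Nat) < 2 ^ (p + 1) := Nat.lt_two_pow_self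
      have hcast : ((2 : Int) ^ (p + 1)) = ((2 ^ (p + 1) : Nat) : Int) := by push_cast; ring
      omega
    rw [hkey]
    cases hall : (PySem.List.pyRange 0 size 1).all (good bin_num) <;> simp

-- ===== VERDICT (by name: the statement is the Claim_ definition above) =====
theorem solution_spec : Claim_equal_solution := by
  intro numbers _
  unfold Spec_solution solution solution_alt
  apply PySem.List.foldl_congr_mem
  intro acc num _
  exact step_eq acc num
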